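-- pv_equiv track=rewrite | github.com/KT-1991/sqrt2-origami-studio | py/old/generator_grid_prune_dyadic.py | _q2_reduce
-- ===== SOURCE A (Python) =====
-- from typing import Dict, List, Optional, Sequence, Set, Tuple
--
-- def _q2_reduce(a: int, b: int, k: int) -> Tuple[int, int, int]:
--     if a == 0 and b == 0:
--         return (0, 0, 0)
--     while k > 0 and (a & 1) == 0 and (b & 1) == 0:
--         a >>= 1
--         b >>= 1
--         k -= 1
--     return (a, b, k)
-- ===== SOURCE B (Python) =====
-- def _q2_reduce(a, b, k):
--     if a == 0 and b == 0:
--         return (0, 0, 0)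
--     if k <= 0:
--         return (a, b, k)
--     m = a | b
--     t = min(k, (m & -m).bit_length() - 1)
--     return (a >> t, b >> t, k - t)
-- ===== Notes on version B (the rewrite author's own statement) =====
-- stated objective: faster
-- what changed: Replaces the shift-one-bit-per-iteration loop with a single count of common trailing zeros via the lowest-set-bit trick on a|b, followed by one shift by min(k, ctz).
import Mathlib
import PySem

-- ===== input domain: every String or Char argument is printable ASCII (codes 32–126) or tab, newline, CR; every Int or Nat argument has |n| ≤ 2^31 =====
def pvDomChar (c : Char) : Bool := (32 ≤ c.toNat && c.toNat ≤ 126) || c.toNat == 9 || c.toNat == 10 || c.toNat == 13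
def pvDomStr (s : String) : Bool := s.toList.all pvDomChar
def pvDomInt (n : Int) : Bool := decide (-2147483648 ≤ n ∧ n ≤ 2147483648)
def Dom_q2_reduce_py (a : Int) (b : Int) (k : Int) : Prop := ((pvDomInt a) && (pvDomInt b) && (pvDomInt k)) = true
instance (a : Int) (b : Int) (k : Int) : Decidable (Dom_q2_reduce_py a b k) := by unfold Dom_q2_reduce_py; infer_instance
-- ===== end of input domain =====

-- B replaces A's shift-one-bit-per-iteration loop by a single count of the common
-- trailing zeros (lowest set bit of a|b) and one shift by min(k, ctz); objective: faster.

-- ===== PORT A =====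
-- the while loop of A: shift both numbers right by one while k > 0 and both are even
def q2ReduceLoop (a : Int) (b : Int) (k : Int) : List Int :=
  if h : 0 < k ∧ PySem.Int.band a 1 = 0 ∧ PySem.Int.band b 1 = 0 then
    q2ReduceLoop (a >>> (1 : Nat)) (b >>> (1 : Nat)) (k - 1)
  else [a, b, k]
termination_by k.toNat
decreasing_by omega

def q2_reduce_py (a : Int) (b : Int) (k : Int) : List Int :=
  if a = 0 ∧ b = 0 then [0, 0, 0] else q2ReduceLoop a b k

-- ===== PORT B =====
-- t is always ≥ 0 here (k > 0 and bit_length ≥ 1), so `t.toNat` is Python's `>> t` exactly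
def q2_reduce_py_alt (a : Int) (b : Int) (k : Int) : List Int :=
  if a = 0 ∧ b = 0 then [0, 0, 0]
  else if k ≤ 0 then [a, b, k]
  else
    let m : Int := PySem.Int.bor a b
    let t : Int := min k ((PySem.Int.bitLength (PySem.Int.band m (-m)) : Int) - 1)
    [a >>> t.toNat, b >>> t.toNat, k - t]

-- ===== PRECONDITION & SPEC =====
def Spec_q2_reduce_py (a : Int) (b : Int) (k : Int) (out : List Int) : Prop := out = q2_reduce_py_alt a b k
instance (a : Int) (b : Int) (k : Int) (out : List Int) : Decidable (Spec_q2_reduce_py a b k out) := by unfold Spec_q2_reduce_py; infer_instance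

-- ===== CLAIM (what is proved, stated in full; the proofs are below) =====
def Claim_equal_q2_reduce_py : Prop := ∀ (a : Int) (b : Int) (k : Int), Dom_q2_reduce_py a b k → Spec_q2_reduce_py a b k (q2_reduce_py a b k)

-- ===== LEMMAS AND PROOFS =====

-- bit-level facts about Nat's &&& / |||

lemma land_bit (u v r s : Nat) (hr : r < 2) (hs : s < 2) :
    (2*u+r) &&& (2*v+s) = 2*(u &&& v) + (r &&& s) := by
  have hrs : r &&& s < 2 := lt_of_le_of_lt Nat.and_le_left hr
  apply Nat.eq_of_testBit_eq
  intro i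
  cases i with
  | zero =>
    rw [Nat.testBit_land]
    simp only [Nat.testBit_zero]
    rw [show (2*u+r) % 2 = r % 2 by omega, show (2*v+s) % 2 = s % 2 by omega,
        show (2*(u &&& v)+(r &&& s)) % 2 = (r &&& s) % 2 by omega]
    interval_cases r <;> interval_cases s <;> decide
  | succ i =>
    rw [Nat.testBit_land]
    simp only [Nat.testBit_succ]
    rw [show (2*u+r)/2 = u by omega, show (2*v+s)/2 = v by omega,
        show (2*(u &&& v)+(r &&& s))/2 = u &&& v by omega]
    exact (Nat.testBit_land u v i).symm

lemma lor_bit (u v r s : Nat) (hr : r < 2) (hs : s < 2) :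
    (2*u+r) ||| (2*v+s) = 2*(u ||| v) + (r ||| s) := by
  have hrs : r ||| s < 2 := by interval_cases r <;> interval_cases s <;> decide
  apply Nat.eq_of_testBit_eq
  intro i
  cases i with
  | zero =>
    rw [Nat.testBit_lor]
    simp only [Nat.testBit_zero]
    rw [show (2*u+r) % 2 = r % 2 by omega, show (2*v+s) % 2 = s % 2 by omega,
        show (2*(u ||| v)+(r ||| s)) % 2 = (r ||| s) % 2 by omega]
    interval_cases r <;> interval_cases s <;> decide
  | succ i =>
    rw [Nat.testBit_lor]
    simp only [Nat.testBit_succ]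
    rw [show (2*u+r)/2 = u by omega, show (2*v+s)/2 = v by omega,
        show (2*(u ||| v)+(r ||| s))/2 = u ||| v by omega]
    exact (Nat.testBit_lor u v i).symm

lemma land_mod_two (u v : Nat) : (u &&& v) % 2 = (u % 2) &&& (v % 2) := by
  have h := land_bit (u/2) (v/2) (u%2) (v%2) (by omega) (by omega)
  rw [show 2*(u/2)+u%2 = u by omega, show 2*(v/2)+v%2 = v by omega] at h
  have hb : (u % 2) &&& (v % 2) < 2 := lt_of_le_of_lt Nat.and_le_left (by omega)
  omega

lemma lor_mod_two (u v : Nat) : (u ||| v) % 2 = (u % 2) ||| (v % 2) := by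
  have h := lor_bit (u/2) (v/2) (u%2) (v%2) (by omega) (by omega)
  rw [show 2*(u/2)+u%2 = u by omega, show 2*(v/2)+v%2 = v by omega] at h
  have hb : (u % 2) ||| (v % 2) < 2 := by
    rcases Nat.mod_two_eq_zero_or_one u with h1|h1 <;>
    rcases Nat.mod_two_eq_zero_or_one v with h2|h2 <;> rw [h1, h2] <;> decide
  omega

lemma lor_eq_zero {u v : Nat} (h : u ||| v = 0) : u = 0 ∧ v = 0 := by
  constructor <;>
  · apply Nat.eq_of_testBit_eq
    intro i
    have h2 := congrArg (fun x => Nat.testBit x i) h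
    simp only [Nat.testBit_lor, Nat.zero_testBit] at h2 ⊢
    rcases Bool.or_eq_false_iff.mp h2 with ⟨h3, h4⟩
    simp [h3, h4]

-- facts about PySem's Python-exact band / bor on Int

lemma band_one_eq_zero_iff (a : Int) : PySem.Int.band a 1 = 0 ↔ a % 2 = 0 := by
  simp only [PySem.Int.band]
  split_ifs with h1 h2 h2
  · rw [show ((1:Int).toNat) = 1 from rfl, Nat.and_one_is_mod]
    omega
  · omega
  · rw [show ((1:Int).toNat) = 1 from rfl, Nat.land_comm, Nat.and_one_is_mod]
    omega
  · omega

lemma bor_mod_two (a b : Int) :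
    PySem.Int.bor a b % 2 = 0 ↔ (a % 2 = 0 ∧ b % 2 = 0) := by
  simp only [PySem.Int.bor]
  split_ifs with ha hb hb
  · have h1 := lor_mod_two a.toNat b.toNat
    rcases Nat.mod_two_eq_zero_or_one a.toNat with p1|p1 <;>
      rcases Nat.mod_two_eq_zero_or_one b.toNat with p2|p2 <;>
      rw [p1, p2] at h1 <;>
      simp only [Nat.or_zero, Nat.zero_or, Nat.or_self] at h1 <;> omega
  · have h2 := land_mod_two (-b-1).toNat a.toNat
    have le : (-b-1).toNat &&& a.toNat ≤ (-b-1).toNat := Nat.and_le_left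
    rcases Nat.mod_two_eq_zero_or_one (-b-1).toNat with p1|p1 <;>
      rcases Nat.mod_two_eq_zero_or_one a.toNat with p2|p2 <;>
      rw [p1, p2] at h2 <;>
      simp only [Nat.and_zero, Nat.zero_and, Nat.and_self] at h2 <;> omega
  · have h3 := land_mod_two (-a-1).toNat b.toNat
    have le : (-a-1).toNat &&& b.toNat ≤ (-a-1).toNat := Nat.and_le_left
    rcases Nat.mod_two_eq_zero_or_one (-a-1).toNat with p1|p1 <;>
      rcases Nat.mod_two_eq_zero_or_one b.toNat with p2|p2 <;>
      rw [p1, p2] at h3 <;>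
      simp only [Nat.and_zero, Nat.zero_and, Nat.and_self] at h3 <;> omega
  · have h4 := land_mod_two (-a-1).toNat (-b-1).toNat
    have le : (-a-1).toNat &&& (-b-1).toNat ≤ (-a-1).toNat := Nat.and_le_left
    rcases Nat.mod_two_eq_zero_or_one (-a-1).toNat with p1|p1 <;>
      rcases Nat.mod_two_eq_zero_or_one (-b-1).toNat with p2|p2 <;>
      rw [p1, p2] at h4 <;>
      simp only [Nat.and_zero, Nat.zero_and, Nat.and_self] at h4 <;> omega

lemma bor_two_mul (x y : Int) :
    PySem.Int.bor (2*x) (2*y) = 2 * PySem.Int.bor x y := by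
  simp only [PySem.Int.bor]
  split_ifs with h1 h2 h3 h4 h5 h6 h7 h8 h9 <;> try omega
  · -- x ≥ 0, y ≥ 0
    have h := lor_bit x.toNat y.toNat 0 0 (by omega) (by omega)
    simp only [Nat.add_zero, Nat.or_zero] at h
    rw [show ((2*x).toNat) = 2*x.toNat by omega, show ((2*y).toNat) = 2*y.toNat by omega]
    omega
  · -- x ≥ 0, y < 0
    have h := land_bit (-y-1).toNat x.toNat 1 0 (by omega) (by omega)
    simp only [Nat.add_zero] at h
    rw [show (1 &&& 0) = 0 from rfl, Nat.add_zero] at h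
    have le : (-y-1).toNat &&& x.toNat ≤ (-y-1).toNat := Nat.and_le_left
    rw [show ((-(2*y)-1).toNat) = 2*(-y-1).toNat + 1 by omega,
        show ((2*x).toNat) = 2*x.toNat by omega]
    omega
  · -- x < 0, y ≥ 0
    have h := land_bit (-x-1).toNat y.toNat 1 0 (by omega) (by omega)
    simp only [Nat.add_zero] at h
    rw [show (1 &&& 0) = 0 from rfl, Nat.add_zero] at h
    have le : (-x-1).toNat &&& y.toNat ≤ (-x-1).toNat := Nat.and_le_left
    rw [show ((-(2*x)-1).toNat) = 2*(-x-1).toNat + 1 by omega,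
        show ((2*y).toNat) = 2*y.toNat by omega]
    omega
  · -- x < 0, y < 0
    have h := land_bit (-x-1).toNat (-y-1).toNat 1 1 (by omega) (by omega)
    rw [show (1 &&& 1) = 1 from rfl] at h
    rw [show ((-(2*x)-1).toNat) = 2*(-x-1).toNat + 1 by omega,
        show ((-(2*y)-1).toNat) = 2*(-y-1).toNat + 1 by omega]
    omega

lemma bor_eq_zero (a b : Int) (h : PySem.Int.bor a b = 0) : a = 0 ∧ b = 0 := by
  revert h
  simp only [PySem.Int.bor]
  split_ifs with h1 h2 h2 <;> intro h
  · have : a.toNat ||| b.toNat = 0 := by omega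
    have := lor_eq_zero this
    omega
  · omega
  · omega
  · omega

-- the lowest-set-bit expression  n - (n &&& (n-1))  used by B

def fz (n : Nat) : Nat := n - (n &&& (n-1))

lemma fz_odd (n : Nat) (h : n % 2 = 1) : fz n = 1 := by
  have h2 := land_bit (n/2) (n/2) 1 0 (by omega) (by omega)
  rw [show 2*(n/2)+1 = n by omega, show 2*(n/2)+0 = n - 1 by omega] at h2
  rw [show ((n/2) &&& (n/2)) = n/2 from Nat.and_self _, show (1 &&& 0) = 0 from rfl] at h2
  unfold fz
  omega

lemma fz_even (n : Nat) (h0 : 0 < n) (h : n % 2 = 0) : fz n = 2 * fz (n/2) := by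
  have h2 := land_bit (n/2) (n/2 - 1) 0 1 (by omega) (by omega)
  rw [show 2*(n/2)+0 = n by omega, show 2*(n/2-1)+1 = n - 1 by omega,
      show (0 &&& 1) = 0 from rfl] at h2
  have le : (n/2) &&& (n/2 - 1) ≤ n/2 := Nat.and_le_left
  unfold fz
  omega

lemma fz_spec : ∀ n : Nat, 0 < n → ∃ j : Nat, fz n = 2^j ∧ 2^j ∣ n ∧ ¬ 2^(j+1) ∣ n := by
  intro n
  induction n using Nat.strong_induction_on with
  | _ n IH =>
    intro h0
    rcases Nat.mod_two_eq_zero_or_one n with he|ho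
    · have hlt : n/2 < n := by omega
      obtain ⟨j, hf, hd, hnd⟩ := IH (n/2) hlt (by omega)
      refine ⟨j+1, ?_, ?_, ?_⟩
      · rw [fz_even n h0 he, hf, pow_succ]; ring
      · obtain ⟨c, hc⟩ := hd
        refine ⟨c, ?_⟩
        have hp : (2:Nat)^(j+1) * c = 2 * (2^j * c) := by rw [pow_succ]; ring
        omega
      · rintro ⟨c, hc⟩
        apply hnd
        refine ⟨c, ?_⟩
        have hp : n = 2 * (2^(j+1) * c) := by rw [hc, pow_succ]; ring
        omega
    · refine ⟨0, fz_odd n ho, one_dvd n, ?_⟩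
      rw [zero_add, pow_one]
      omega

lemma band_self_neg (m : Int) : PySem.Int.band m (-m) = ((fz m.natAbs : Nat) : Int) := by
  simp only [PySem.Int.band, fz]
  split_ifs with h1 h2 h2
  · have hm : m = 0 := by omega
    subst hm
    decide
  · rw [show (-(-m)-1 : Int) = m - 1 by ring]
    rw [show ((m : Int).toNat) = m.natAbs by omega, show ((m-1 : Int).toNat) = m.natAbs - 1 by omega]
  · rw [show ((-m : Int).toNat) = m.natAbs by omega, show ((-m-1 : Int).toNat) = m.natAbs - 1 by omega]
  · omega

lemma bitLength_two_pow (j : Nat) : PySem.Int.bitLength ((2:Int)^j) = j + 1 := by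
  induction j with
  | zero => decide
  | succ j IH =>
    have hp : (0:Int) < 2^(j+1) := by positivity
    rw [PySem.Int.bitLength_of_pos hp,
        PySem.Int.floordiv_eq_ediv_of_pos (by norm_num : (0:Int) < 2),
        show ((2:Int)^(j+1))/2 = 2^j from by rw [pow_succ]; exact Int.mul_ediv_cancel _ two_ne_zero,
        IH]

lemma pow_dvd_bor_iff : ∀ (j : Nat) (a b : Int),
    ((2:Int)^j ∣ PySem.Int.bor a b) ↔ ((2:Int)^j ∣ a ∧ (2:Int)^j ∣ b) := by
  intro j
  induction j with
  | zero => intro a b; simp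
  | succ j IH =>
    intro a b
    have h2pow : (2:Int) ∣ 2^(j+1) := dvd_pow_self 2 (Nat.succ_ne_zero j)
    constructor
    · intro h
      have hm2 : (2:Int) ∣ PySem.Int.bor a b := dvd_trans h2pow h
      have hpar := (bor_mod_two a b).mp (by omega)
      have ha2 : (2:Int) ∣ a := by omega
      have hb2 : (2:Int) ∣ b := by omega
      obtain ⟨a', rfl⟩ := ha2
      obtain ⟨b', rfl⟩ := hb2
      rw [bor_two_mul] at h
      rw [pow_succ, mul_comm ((2:Int)^j) 2] at h ⊢
      have h' := (mul_dvd_mul_iff_left (by norm_num : (2:Int) ≠ 0)).mp h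
      obtain ⟨hda, hdb⟩ := (IH a' b').mp h'
      exact ⟨mul_dvd_mul_left 2 hda, mul_dvd_mul_left 2 hdb⟩
    · rintro ⟨ha, hb⟩
      have ha2 : (2:Int) ∣ a := dvd_trans h2pow ha
      have hb2 : (2:Int) ∣ b := dvd_trans h2pow hb
      obtain ⟨a', rfl⟩ := ha2
      obtain ⟨b', rfl⟩ := hb2
      rw [pow_succ, mul_comm ((2:Int)^j) 2] at ha hb ⊢
      rw [bor_two_mul]
      exact mul_dvd_mul_left 2 ((IH a' b').mpr
        ⟨(mul_dvd_mul_iff_left (by norm_num : (2:Int) ≠ 0)).mp ha,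
         (mul_dvd_mul_iff_left (by norm_num : (2:Int) ≠ 0)).mp hb⟩)

-- closed form of A's loop: it runs exactly t iterations

lemma loop_cf : ∀ (t : Nat) (a b k : Int), (t:Int) ≤ k → ((2:Int)^t ∣ a) → ((2:Int)^t ∣ b) →
    ((t:Int) = k ∨ ¬((2:Int)^(t+1) ∣ a) ∨ ¬((2:Int)^(t+1) ∣ b)) →
    q2ReduceLoop a b k = [a / 2^t, b / 2^t, k - t] := by
  intro t
  induction t with
  | zero =>
    intro a b k hk _ _ hstop
    rw [q2ReduceLoop, dif_neg]
    · simp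
    · rintro ⟨hk0, hae, hbe⟩
      rcases hstop with h|h|h
      · omega
      · refine h ?_
        have ha2 := (band_one_eq_zero_iff a).mp hae
        rw [zero_add, pow_one]
        omega
      · refine h ?_
        have hb2 := (band_one_eq_zero_iff b).mp hbe
        rw [zero_add, pow_one]
        omega
  | succ t IH =>
    intro a b k hk ha hb hstop
    have hk0 : 0 < k := by omega
    have h2pow : (2:Int) ∣ 2^(t+1) := dvd_pow_self 2 (Nat.succ_ne_zero t)
    have ha2 : (2:Int) ∣ a := dvd_trans h2pow ha
    have hb2 : (2:Int) ∣ b := dvd_trans h2pow hb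
    rw [q2ReduceLoop, dif_pos ⟨hk0, (band_one_eq_zero_iff a).mpr (by omega),
        (band_one_eq_zero_iff b).mpr (by omega)⟩]
    obtain ⟨a', rfl⟩ := ha2
    obtain ⟨b', rfl⟩ := hb2
    have hsh : ∀ x : Int, (2*x) >>> (1:Nat) = x := by
      intro x
      rw [Int.shiftRight_eq_div_pow, show (((2:Nat)^1 : Nat) : Int) = 2 by norm_num]
      exact Int.mul_ediv_cancel_left x two_ne_zero
    rw [hsh, hsh]
    have hda : (2:Int)^t ∣ a' := by
      rw [pow_succ, mul_comm ((2:Int)^t) 2] at ha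
      exact (mul_dvd_mul_iff_left (by norm_num : (2:Int) ≠ 0)).mp ha
    have hdb : (2:Int)^t ∣ b' := by
      rw [pow_succ, mul_comm ((2:Int)^t) 2] at hb
      exact (mul_dvd_mul_iff_left (by norm_num : (2:Int) ≠ 0)).mp hb
    have hds : (t:Int) = k - 1 ∨ ¬((2:Int)^(t+1) ∣ a') ∨ ¬((2:Int)^(t+1) ∣ b') := by
      rcases hstop with h|h|h
      · left; push_cast at h ⊢; omega
      · right; left
        intro hc
        exact h (by rw [pow_succ, mul_comm ((2:Int)^(t+1)) 2]; exact mul_dvd_mul_left 2 hc)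
      · right; right
        intro hc
        exact h (by rw [pow_succ, mul_comm ((2:Int)^(t+1)) 2]; exact mul_dvd_mul_left 2 hc)
    rw [IH a' b' (k-1) (by push_cast at hk ⊢; omega) hda hdb hds]
    have he : ∀ x : Int, x / 2^t = (2*x) / 2^(t+1) := by
      intro x
      rw [pow_succ, mul_comm ((2:Int)^t) 2, Int.mul_ediv_mul_of_pos x (2^t) (by norm_num : (0:Int) < 2)]
    simp only [List.cons.injEq, and_true]
    refine ⟨he a', he b', by push_cast; ring⟩
  
-- main equivalence

lemma main_eq (a b k : Int) : q2_reduce_py a b k = q2_reduce_py_alt a b k := by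
  by_cases hab : a = 0 ∧ b = 0
  · simp [q2_reduce_py, q2_reduce_py_alt, hab]
  · by_cases hk : k ≤ 0
    · have hstop : ¬(0 < k ∧ PySem.Int.band a 1 = 0 ∧ PySem.Int.band b 1 = 0) := by
        rintro ⟨h, _, _⟩; omega
      simp only [q2_reduce_py, q2_reduce_py_alt, if_neg hab, if_pos hk]
      rw [q2ReduceLoop, dif_neg hstop]
    · have hk0 : 0 < k := by omega
      set m := PySem.Int.bor a b with hm
      have hmne : m ≠ 0 := fun h => hab (bor_eq_zero a b h)
      have hpos : 0 < m.natAbs := by omega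
      obtain ⟨j, hfz, hdvd, hndvd⟩ := fz_spec m.natAbs hpos
      have hband : PySem.Int.band m (-m) = (2:Int)^j := by
        rw [band_self_neg, hfz]; push_cast; ring
      have hdvdm : (2:Int)^j ∣ m :=
        Int.natAbs_dvd_natAbs.mp (by simpa [Int.natAbs_pow] using hdvd)
      have hndvdm : ¬ (2:Int)^(j+1) ∣ m := fun h =>
        hndvd (by simpa [Int.natAbs_pow] using Int.natAbs_dvd_natAbs.mpr h)
      have hab2 := (pow_dvd_bor_iff j a b).mp (hm ▸ hdvdm)
      have hnot : ¬((2:Int)^(j+1) ∣ a ∧ (2:Int)^(j+1) ∣ b) := fun ⟨h1, h2⟩ =>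
        hndvdm (hm ▸ (pow_dvd_bor_iff (j+1) a b).mpr ⟨h1, h2⟩)
      simp only [q2_reduce_py, q2_reduce_py_alt, if_neg hab, if_neg hk]
      rw [← hm, hband, bitLength_two_pow,
          show (((j+1 : Nat)) : Int) - 1 = (j:Int) from by push_cast; ring]
      by_cases hcase : (j:Int) ≤ k
      · rw [min_eq_right hcase,
            loop_cf j a b k hcase hab2.1 hab2.2 (by rcases not_and_or.mp hnot with h|h
                                                    · exact Or.inr (Or.inl h)
                                                    · exact Or.inr (Or.inr h))]
        rw [show ((j:Int)).toNat = j from Int.toNat_natCast j,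
            Int.shiftRight_eq_div_pow, Int.shiftRight_eq_div_pow]
        push_cast
        rfl
      · rw [min_eq_left (le_of_not_ge hcase),
            loop_cf k.toNat a b k (by omega)
              (dvd_trans (pow_dvd_pow 2 (by omega : k.toNat ≤ j)) hab2.1)
              (dvd_trans (pow_dvd_pow 2 (by omega : k.toNat ≤ j)) hab2.2)
              (Or.inl (by omega))]
        rw [Int.shiftRight_eq_div_pow, Int.shiftRight_eq_div_pow]
        simp only [List.cons.injEq, and_true]
        refine ⟨by push_cast; rfl, by push_cast; rfl, by omega⟩

-- ===== VERDICT (by name: the statement is the Claim_ definition above) =====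
theorem q2_reduce_py_spec : Claim_equal_q2_reduce_py := by
  intro a b k _
  unfold Spec_q2_reduce_py
  exact main_eq a b k
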